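-- pv_equiv track=rewrite | github.com/weikangliang/DDSM | script/data_iterator_new.py | construct_closest_user_id_list
-- ===== SOURCE A (Python) =====
-- import bisect
--
-- def construct_closest_user_id_list(source_dicts, sorted_item_behaviors, current_user, current_item, current_timestamp, max_user_count=5):
--     if current_item not in sorted_item_behaviors:
--         return None
--
--     records = sorted_item_behaviors[current_item]
--     index = bisect.bisect_left(records, (current_user, current_timestamp))
--     closest_user_list = []
--     closest_user_time_list = []
--     # 向左查找最近的用户
--     left_index = index - 1
--     while left_index >= 0 and len(closest_user_list) < max_user_count:
--         user = records[left_index][0]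
--         # if user == current_user:  # 这个用户可能多次购买过该物品
--         #     continue
--         closest_user_list.append(source_dicts[0][user] if user in source_dicts[0] else 0)
--         closest_user_time_list.append(records[left_index][1])
--         left_index -= 1
--     closest_user_list.reverse(), closest_user_time_list.reverse()
--     return closest_user_list, closest_user_time_list
-- ===== SOURCE B (Python) =====
-- import bisect
--
-- def construct_closest_user_id_list(source_dicts, sorted_item_behaviors, current_user, current_item, current_timestamp, max_user_count=5):
--     if current_item not in sorted_item_behaviors:
--         return None
--     records = sorted_item_behaviors[current_item]
--     index = bisect.bisect_left(records, (current_user, current_timestamp))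
--     window = records[max(0, index - max_user_count):index]
--     return ([source_dicts[0].get(u, 0) for u, _ in window],
--             [t for _, t in window])
-- ===== Notes on version B (the rewrite author's own statement) =====
-- stated objective: simpler
-- what changed: The backward while-loop that appends up to max_user_count entries and then reverses both lists is replaced by taking the contiguous slice records[max(0, index - max_user_count):index] once and mapping the two comprehensions over it, with no mutable accumulators, no index bookkeeping and no final reverse.
import Mathlib
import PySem

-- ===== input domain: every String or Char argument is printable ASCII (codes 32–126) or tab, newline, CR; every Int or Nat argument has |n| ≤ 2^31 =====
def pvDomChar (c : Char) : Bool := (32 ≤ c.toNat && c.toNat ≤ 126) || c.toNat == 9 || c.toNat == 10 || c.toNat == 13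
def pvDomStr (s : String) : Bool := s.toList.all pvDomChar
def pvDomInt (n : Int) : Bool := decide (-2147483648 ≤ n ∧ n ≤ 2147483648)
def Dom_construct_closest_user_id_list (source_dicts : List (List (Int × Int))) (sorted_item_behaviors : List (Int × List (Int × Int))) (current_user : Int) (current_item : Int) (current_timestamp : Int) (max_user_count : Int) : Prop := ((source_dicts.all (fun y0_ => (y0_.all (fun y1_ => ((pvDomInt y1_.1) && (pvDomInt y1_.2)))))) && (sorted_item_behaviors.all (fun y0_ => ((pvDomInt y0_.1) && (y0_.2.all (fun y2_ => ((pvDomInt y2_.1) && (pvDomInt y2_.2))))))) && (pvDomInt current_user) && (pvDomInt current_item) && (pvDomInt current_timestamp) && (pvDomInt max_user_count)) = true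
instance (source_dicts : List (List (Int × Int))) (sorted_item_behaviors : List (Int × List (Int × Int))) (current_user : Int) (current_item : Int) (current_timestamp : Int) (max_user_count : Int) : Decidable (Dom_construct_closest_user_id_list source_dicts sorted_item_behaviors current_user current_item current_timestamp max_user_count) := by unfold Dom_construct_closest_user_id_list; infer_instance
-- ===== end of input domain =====

-- B replaces A's backward while-loop + final reverse by one contiguous slice of the records
-- and two maps over it (objective: simpler). On empty source_dicts both Pythons raise
-- IndexError on the same inputs (source_dicts[0] with a nonempty window); the ports read
-- source_dicts[0] as headD [] there, identically in both.


-- ===== PORT A =====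
-- Python tuple comparison (u, t) < (u', t') (lexicographic), as bisect uses it
def pvPairLt (p q : Int × Int) : Bool := p.1 < q.1 || (p.1 == q.1 && p.2 < q.2)

-- bisect.bisect_left(records, x): lo = 0, hi = len; while lo < hi: mid = (lo+hi)//2; …
-- (fuel = records.length bounds the iteration count, hi - lo shrinks each step;
--  shared helper: BOTH Pythons call the same library function bisect.bisect_left)
def pvBisectLoop (records : List (Int × Int)) (x : Int × Int) : Nat → Nat → Nat → Nat
  | 0, lo, _ => lo
  | fuel + 1, lo, hi =>
    if lo < hi then
      -- mid = (lo + hi) // 2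
      if pvPairLt (records.getD ((lo + hi) / 2) (0, 0)) x then pvBisectLoop records x fuel ((lo + hi) / 2 + 1) hi
      else pvBisectLoop records x fuel lo ((lo + hi) / 2)
    else lo

-- A's backward while-loop: while left_index >= 0 and len(closest_user_list) < max_user_count: …
-- (records[left_index] via getD: left_index is provably in range whenever the loop body runs)
def pvALoop (d : PySem.Dict Int Int) (records : List (Int × Int)) (max_user_count : Int)
    (left_index : Int) (ul tl : List Int) : List Int × List Int :=
  if h : 0 ≤ left_index ∧ (ul.length : Int) < max_user_count then
    let rec0 := records.getD left_index.toNat (0, 0)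
    pvALoop d records max_user_count (left_index - 1)
      (ul ++ [PySem.Dict.getD d rec0.1 0]) (tl ++ [rec0.2])
  else (ul, tl)
termination_by (left_index + 1).toNat
decreasing_by omega

def construct_closest_user_id_list (source_dicts : List (List (Int × Int))) (sorted_item_behaviors : List (Int × List (Int × Int))) (current_user : Int) (current_item : Int) (current_timestamp : Int) (max_user_count : Int) : Option (List Int × List Int) :=
  match (PySem.Dict.mk sorted_item_behaviors).get? current_item with
  | none => none     -- if current_item not in sorted_item_behaviors: return None
  | some records =>
    let index := pvBisectLoop records (current_user, current_timestamp) records.length 0 records.length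
    let d := PySem.Dict.mk (source_dicts.headD [])
    let r := pvALoop d records max_user_count ((index : Int) - 1) [] []
    some (r.1.reverse, r.2.reverse)

-- ===== PORT B =====
def construct_closest_user_id_list_alt (source_dicts : List (List (Int × Int))) (sorted_item_behaviors : List (Int × List (Int × Int))) (current_user : Int) (current_item : Int) (current_timestamp : Int) (max_user_count : Int) : Option (List Int × List Int) :=
  match (PySem.Dict.mk sorted_item_behaviors).get? current_item with
  | none => none
  | some records =>
    let index : Int := pvBisectLoop records (current_user, current_timestamp) records.length 0 records.length
    let window := PySem.List.slice records (some (max 0 (index - max_user_count))) (some index)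
    let d := PySem.Dict.mk (source_dicts.headD [])
    some (window.map (fun p => PySem.Dict.getD d p.1 0), window.map (fun p => p.2))

-- ===== PRECONDITION & SPEC =====
def Spec_construct_closest_user_id_list (source_dicts : List (List (Int × Int))) (sorted_item_behaviors : List (Int × List (Int × Int))) (current_user : Int) (current_item : Int) (current_timestamp : Int) (max_user_count : Int) (out : Option (List Int × List Int)) : Prop := out = construct_closest_user_id_list_alt source_dicts sorted_item_behaviors current_user current_item current_timestamp max_user_count
instance (source_dicts : List (List (Int × Int))) (sorted_item_behaviors : List (Int × List (Int × Int))) (current_user : Int) (current_item : Int) (current_timestamp : Int) (max_user_count : Int) (out : Option (List Int × List Int)) : Decidable (Spec_construct_closest_user_id_list source_dicts sorted_item_behaviors current_user current_item current_timestamp max_user_count out) := by unfold Spec_construct_closest_user_id_list; infer_instance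

-- ===== CLAIM (what is proved, stated in full; the proofs are below) =====
def Claim_equal_construct_closest_user_id_list : Prop := ∀ (source_dicts : List (List (Int × Int))) (sorted_item_behaviors : List (Int × List (Int × Int))) (current_user : Int) (current_item : Int) (current_timestamp : Int) (max_user_count : Int), Dom_construct_closest_user_id_list source_dicts sorted_item_behaviors current_user current_item current_timestamp max_user_count → Spec_construct_closest_user_id_list source_dicts sorted_item_behaviors current_user current_item current_timestamp max_user_count (construct_closest_user_id_list source_dicts sorted_item_behaviors current_user current_item current_timestamp max_user_count)

-- ===== LEMMAS AND PROOFS =====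
theorem pvBisectLoop_le (records : List (Int × Int)) (x : Int × Int) :
    ∀ (fuel lo hi : Nat), lo ≤ hi → pvBisectLoop records x fuel lo hi ≤ hi := by
  intro fuel
  induction fuel with
  | zero => intro lo hi h; simpa [pvBisectLoop] using h
  | succ fuel ih =>
    intro lo hi h
    rw [pvBisectLoop]
    split
    · split
      · exact ih _ _ (by omega)
      · exact le_trans (ih _ _ (by omega)) (by omega)
    · exact h

theorem pvALoop_spec (d : PySem.Dict Int Int) (records : List (Int × Int)) (m : Int) :
    ∀ (i : Nat), i ≤ records.length → ∀ (ul tl : List Int),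
    pvALoop d records m ((i : Int) - 1) ul tl =
      (ul ++ (((records.drop (((i : Int) - (m - ul.length)).toNat)).take
                 (i - ((i : Int) - (m - ul.length)).toNat)).map
               (fun p => PySem.Dict.getD d p.1 0)).reverse,
       tl ++ (((records.drop (((i : Int) - (m - ul.length)).toNat)).take
                 (i - ((i : Int) - (m - ul.length)).toNat)).map
               (fun p => p.2)).reverse) := by
  intro i
  induction i with
  | zero =>
    intro _ ul tl
    rw [pvALoop, dif_neg (by omega)]
    simp
  | succ i ih =>
    intro hlen ul tl
    rw [pvALoop]
    by_cases hc : (ul.length : Int) < m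
    · rw [dif_pos ⟨by omega, hc⟩]
      have hi : i < records.length := by omega
      have hrec : records.getD ((i : Int) + 1 - 1).toNat (0, 0) = records[i] := by
        have : ((i : Int) + 1 - 1).toNat = i := by omega
        rw [this, List.getD_eq_getElem _ _ hi]
      have hstep : ((i : Int) + 1 - 1) - 1 = (i : Int) - 1 := by ring
      rw [show ((i : Int) + 1 - 1) = ((i : Int) + 1) - 1 by ring] at hrec
      simp only [Nat.cast_succ] at *
      rw [hstep, hrec, ih (by omega)]
      -- window bookkeeping
      set c : Int := m - ul.length with hcdef
      have hc1 : 1 ≤ c := by omega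
      set s : Nat := ((i : Int) + 1 - c).toNat with hsdef
      have hs_le : s ≤ i := by omega
      have hs' : ((i : Int) - (m - ((ul.length : Int) + 1))).toNat = s := by omega
      have hlen' : (ul ++ [PySem.Dict.getD d records[i].1 0]).length = ul.length + 1 := by simp
      have hlen'' : (tl ++ [records[i].2]).length = tl.length + 1 := by simp
      have hwin : (records.drop s).take (i + 1 - s) =
          (records.drop s).take (i - s) ++ [records[i]] := by
        have h1 : i + 1 - s = (i - s) + 1 := by omega
        rw [h1, List.take_add_one]
        have h2 : (records.drop s)[i - s]? = some records[i] := by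
          rw [List.getElem?_drop]
          have : s + (i - s) = i := by omega
          rw [this, List.getElem?_eq_getElem hi]
        rw [h2]
        rfl
      simp only [hlen', Nat.cast_add, Nat.cast_one, hs']
      rw [show (m - ((ul.length : Int) + 1)) = c - 1 by omega] at *
      rw [hwin]
      simp
    · rw [dif_neg (by omega)]
      have hempty : i + 1 - ((i : Int) + 1 - (m - ul.length)).toNat = 0 := by omega
      simp only [Nat.cast_succ] at *
      rw [hempty]
      simp

theorem construct_closest_user_id_list_spec : Claim_equal_construct_closest_user_id_list := by
  intro sd sib cu ci ct m _
  unfold Spec_construct_closest_user_id_list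
  unfold construct_closest_user_id_list construct_closest_user_id_list_alt
  cases hlook : (PySem.Dict.mk sib).get? ci with
  | none => rfl
  | some records =>
    simp only []
    set n : Nat := pvBisectLoop records (cu, ct) records.length 0 records.length with hndef
    have hn : n ≤ records.length := pvBisectLoop_le records (cu, ct) records.length 0 records.length (Nat.zero_le _)
    set d := PySem.Dict.mk (sd.headD []) with hddef
    have hA := pvALoop_spec d records m n hn [] []
    rw [hA]
    have hmax : max 0 ((n : Int) - m) = (((((n : Int) - m).toNat) : Nat) : Int) := by omega
    rw [hmax, PySem.List.slice_natCast]
    have htake : n - (((n : Int) - m).toNat) = n - ((n : Int) - (m - (([] : List Int).length : Int))).toNat := by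
      simp
    simp only [List.length_nil, Nat.cast_zero, sub_zero] at *
    simp
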